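-- pv_equiv track=rewrite | github.com/Nikita3dprint/pythonHW04.07.2023 | 12.py | klv_zero
-- ===== SOURCE A (Python) =====
-- def klv_zero(a):
--     a1 = int(a)
--     k = 0
--     while a1 > 0:
--         if a1 % 2 == 0:
--             k = k + 1
--         a1 = a1 // 2
--     return k
-- ===== SOURCE B (Python) =====
-- def klv_zero(a):
--     a1 = int(a)
--     if a1 <= 0:
--         return 0
--     return a1.bit_length() - bin(a1).count('1')
-- ===== Notes on version B (the rewrite author's own statement) =====
-- stated objective: alternative
-- what changed: Replaces the bit-by-bit mod/floordiv counting loop with a closed popcount view: zero bits = bit_length minus number of set bits (via bin().count), with an explicit non-positive guard.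
import Mathlib
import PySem

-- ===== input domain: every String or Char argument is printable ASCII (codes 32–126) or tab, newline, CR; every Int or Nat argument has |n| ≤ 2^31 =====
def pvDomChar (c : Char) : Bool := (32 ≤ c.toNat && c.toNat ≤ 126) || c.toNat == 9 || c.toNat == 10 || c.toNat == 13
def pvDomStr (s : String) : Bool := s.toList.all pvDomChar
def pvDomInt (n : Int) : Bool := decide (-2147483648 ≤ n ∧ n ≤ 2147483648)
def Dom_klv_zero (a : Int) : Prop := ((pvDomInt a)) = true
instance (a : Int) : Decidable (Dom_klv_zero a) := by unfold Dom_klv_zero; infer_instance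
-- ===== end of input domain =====

-- B computes zero bits as bit_length minus popcount instead of A's per-bit loop (objective: alternative decomposition).
-- ===== PORT A =====
-- while a1 > 0: count even steps, halving with Python floordiv
def klv_zero_go (a1 k : Int) : Int :=
  if h : a1 > 0 then
    klv_zero_go (PySem.Int.floordiv a1 2) (if PySem.Int.mod a1 2 = 0 then k + 1 else k)
  else k
termination_by a1.toNat
decreasing_by
  simp [PySem.Int.floordiv, Int.fdiv_eq_ediv]
  omega

def klv_zero (a : Int) : Int := klv_zero_go a 0

-- ===== PORT B =====
-- a1.bit_length()
def pvBitLen (n : Nat) : Nat :=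
  if n = 0 then 0 else pvBitLen (n / 2) + 1

-- bin(a1).count('1') for a1 ≥ 0: the number of set bits
def pvPopCount (n : Nat) : Nat :=
  if n = 0 then 0 else pvPopCount (n / 2) + n % 2

def klv_zero_alt (a : Int) : Int :=
  if a ≤ 0 then 0 else (pvBitLen a.toNat : Int) - (pvPopCount a.toNat : Int)

-- ===== PRECONDITION & SPEC =====
def Spec_klv_zero (a : Int) (out : Int) : Prop := out = klv_zero_alt a
instance (a : Int) (out : Int) : Decidable (Spec_klv_zero a out) := by unfold Spec_klv_zero; infer_instance

-- ===== CLAIM (what is proved, stated in full; the proofs are below) =====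
def Claim_equal_klv_zero : Prop := ∀ (a : Int), Dom_klv_zero a → Spec_klv_zero a (klv_zero a)

-- ===== LEMMAS AND PROOFS =====

-- ===== VERDICT (by name: the statement is the Claim_ definition above) =====
theorem pvBitLen_pos (n : Nat) (h : n ≠ 0) : pvBitLen n = pvBitLen (n / 2) + 1 := by
  rw [pvBitLen, if_neg h]

theorem pvPopCount_pos (n : Nat) (h : n ≠ 0) : pvPopCount n = pvPopCount (n / 2) + n % 2 := by
  rw [pvPopCount, if_neg h]

theorem klv_zero_go_eq (n : Nat) : ∀ k : Int,
    klv_zero_go (n : Int) k = k + (pvBitLen n : Int) - (pvPopCount n : Int) := by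
  induction n using Nat.strong_induction_on with
  | _ n ih =>
    intro k
    unfold klv_zero_go
    by_cases h : n = 0
    · subst h; simp [pvBitLen, pvPopCount]
    · have hpos : (n : Int) > 0 := by positivity
      have hfd : PySem.Int.floordiv (n : Int) 2 = ((n / 2 : Nat) : Int) := by
        simp [PySem.Int.floordiv, Int.fdiv_eq_ediv]
      have hmod : PySem.Int.mod (n : Int) 2 = ((n % 2 : Nat) : Int) := by
        simp [PySem.Int.mod, Int.fmod_eq_emod]
      rw [dif_pos hpos, hfd, ih (n / 2) (by omega)]
      rw [pvBitLen_pos n h, pvPopCount_pos n h, hmod]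
      split_ifs with hc <;> push_cast at hc ⊢ <;> omega

theorem klv_zero_spec : Claim_equal_klv_zero := by
  intro a _
  unfold Spec_klv_zero klv_zero klv_zero_alt
  by_cases h : a ≤ 0
  · unfold klv_zero_go
    rw [dif_neg (by omega), if_pos h]
  · have hg : klv_zero_go a 0 = klv_zero_go ((a.toNat : Nat) : Int) 0 := by
      rw [Int.toNat_of_nonneg (by omega)]
    rw [if_neg h, hg, klv_zero_go_eq]
    omega
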